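-- pv_equiv track=rewrite | github.com/edelveart/figuratenum | src/figuratenum/utils.py | helper_ext_int_double_sigma_from_book
-- ===== SOURCE A (Python) =====
-- from math import comb as math_comb, factorial as math_factorial, prod as math_prod
--
-- def binomial_coefficient(n: int, k: int) -> int:
--     """Optimized version using math.comb for production."""
--     return math_comb(n, k)
--
-- def helper_ext_int_double_sigma_from_book(k: int, n: int) -> int:
--     """
--     Original formula-based version from Figurate Numbers (2012).
--     Kept for clarity and educational reference. Slower than the optimized version.
--     """
--     t = ((2 ** 1) * binomial_coefficient(k, 1) * binomial_coefficient(1, 0))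
--     if n == 1:
--         return t + 1
--     a = 0
--     for j in range(1, (n - 1) + 1):
--         for i in range(0, (k - 1) + 1):
--             a += ((2 ** (1 + i)) * binomial_coefficient(k, 1 + i)
--                   * binomial_coefficient(j, i))
--     return 1 + t + a
-- ===== SOURCE B (Python) =====
-- from math import comb as math_comb
--
-- def helper_ext_int_double_sigma_from_book(k: int, n: int) -> int:
--     """Single-sum closed form: swapping the double sum and applying the
--     hockey-stick identity collapses it to sum_{m=0}^{k} 2^m*C(k,m)*C(n,m)."""
--     if n <= 1:
--         # empty/trivial sum region: value is 2k + 1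
--         return 2 * k + 1
--     return sum((1 << m) * math_comb(k, m) * math_comb(n, m) for m in range(k + 1))
-- ===== Notes on version B (the rewrite author's own statement) =====
-- stated objective: faster
-- what changed: Swapped the double sum and applied the hockey-stick identity, collapsing A's O(n*k) double loop into the single-sum closed form sum_{m=0}^{k} 2^m*C(k,m)*C(n,m).
import Mathlib
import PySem

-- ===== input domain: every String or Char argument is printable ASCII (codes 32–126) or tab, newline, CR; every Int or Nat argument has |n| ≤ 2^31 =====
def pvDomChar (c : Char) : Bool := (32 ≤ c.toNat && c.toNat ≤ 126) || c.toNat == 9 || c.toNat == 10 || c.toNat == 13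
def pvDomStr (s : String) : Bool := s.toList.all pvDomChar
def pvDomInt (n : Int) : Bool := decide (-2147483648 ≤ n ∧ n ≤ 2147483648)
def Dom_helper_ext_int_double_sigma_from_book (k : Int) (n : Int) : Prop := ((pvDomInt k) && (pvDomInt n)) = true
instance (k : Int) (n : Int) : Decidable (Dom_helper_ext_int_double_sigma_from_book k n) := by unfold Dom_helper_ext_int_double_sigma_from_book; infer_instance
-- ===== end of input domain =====

-- B replaces A's O(n*k) double loop by the single sum ∑_{m=0}^{k} 2^m·C(k,m)·C(n,m)
-- (swap the sums, apply the hockey-stick identity): objective faster.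


-- ===== PORT A =====
-- math.comb(n, k) on nonnegative arguments (the only ones reached inside Pre_):
def pyComb (n : Int) (k : Int) : Int := (n.toNat.choose k.toNat : Int)

def binomial_coefficient (n : Int) (k : Int) : Int := pyComb n k

def helper_ext_int_double_sigma_from_book (k : Int) (n : Int) : Int :=
  let t := 2 ^ 1 * binomial_coefficient k 1 * binomial_coefficient 1 0
  if n = 1 then t + 1
  else
    -- 2 ** (1 + i): exponent is nonnegative on every iterated i, so .toNat is exact
    let a := (PySem.List.pyRange 1 ((n - 1) + 1) 1).foldl (fun a j =>
      (PySem.List.pyRange 0 ((k - 1) + 1) 1).foldl (fun a i =>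
        a + 2 ^ (1 + i).toNat * binomial_coefficient k (1 + i) * binomial_coefficient j i) a) 0
    1 + t + a

-- ===== PORT B =====
def helper_ext_int_double_sigma_from_book_alt (k : Int) (n : Int) : Int :=
  if n <= 1 then 2 * k + 1
  else (PySem.List.pyRange 0 (k + 1) 1).foldl
    (fun s m => s + 2 ^ m.toNat * pyComb k m * pyComb n m) 0

-- ===== PRECONDITION & SPEC =====
-- Pre_ excludes k < 0, where Python's math.comb raises ValueError in A.
def Pre_helper_ext_int_double_sigma_from_book (k : Int) (n : Int) : Prop := 0 ≤ k
instance (k : Int) (n : Int) : Decidable (Pre_helper_ext_int_double_sigma_from_book k n) := by unfold Pre_helper_ext_int_double_sigma_from_book; infer_instance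
def pvWitness_helper_ext_int_double_sigma_from_book : Int × Int := (3, 5)

def Spec_helper_ext_int_double_sigma_from_book (k : Int) (n : Int) (out : Int) : Prop := out = helper_ext_int_double_sigma_from_book_alt k n
instance (k : Int) (n : Int) (out : Int) : Decidable (Spec_helper_ext_int_double_sigma_from_book k n out) := by unfold Spec_helper_ext_int_double_sigma_from_book; infer_instance

-- ===== CLAIM (what is proved, stated in full; the proofs are below) =====
def Claim_equal_helper_ext_int_double_sigma_from_book : Prop := ∀ (k : Int) (n : Int), Dom_helper_ext_int_double_sigma_from_book k n → Pre_helper_ext_int_double_sigma_from_book k n → Spec_helper_ext_int_double_sigma_from_book k n (helper_ext_int_double_sigma_from_book k n)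

-- ===== LEMMAS AND PROOFS =====

-- the summand of A's double loop (Nat indices, Int value)
-- the summand bridges (proof helpers)
def termA (k j i : ℕ) : ℤ := 2 ^ (1 + i) * (k.choose (1 + i) : ℤ) * (j.choose i : ℤ)
-- the summand of B's single loop
def termB (k n m : ℕ) : ℤ := 2 ^ m * (k.choose m : ℤ) * (n.choose m : ℤ)

lemma sum_map_cast (m : ℕ) (f : Int → ℤ) (c : ℤ) :
    (List.map (f ∘ fun t : ℕ => c + (t : ℤ)) (List.range m)).sum
      = ∑ i ∈ Finset.range m, f (c + (i : ℤ)) := rfl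

lemma pascal_step (k n : ℕ) :
    ∑ m ∈ Finset.range (k + 1), termB k (n + 1) m
      = ∑ m ∈ Finset.range (k + 1), termB k n m + ∑ i ∈ Finset.range k, termA k n i := by
  rw [Finset.sum_range_succ' (termB k (n + 1)) k, Finset.sum_range_succ' (termB k n) k,
    Finset.sum_congr rfl (fun i _ => by
      show termB k (n + 1) (i + 1) = termB k n (i + 1) + termA k n i
      simp only [termB, termA, Nat.add_comm 1 i, Nat.choose_succ_succ']
      push_cast
      ring), Finset.sum_add_distrib]
  simp only [termB, termA, Nat.choose_zero_right]
  ring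

lemma termB_zero_right (k : ℕ) :
    ∑ m ∈ Finset.range (k + 1), termB k 0 m = 1 := by
  rw [Finset.sum_range_succ' (termB k 0) k]
  rw [Finset.sum_eq_zero (fun i _ => by simp [termB])]
  simp [termB]

lemma termA_zero_mid (k : ℕ) :
    ∑ i ∈ Finset.range k, termA k 0 i = 2 * (k : ℤ) := by
  cases k with
  | zero => simp
  | succ K =>
      rw [Finset.sum_eq_single_of_mem 0 (Finset.mem_range.mpr (Nat.succ_pos K))
        (fun i _ hi => by
          obtain ⟨j, rfl⟩ := Nat.exists_eq_succ_of_ne_zero hi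
          simp [termA])]
      simp [termA, Nat.choose_one_right]

lemma base_sum (k : ℕ) :
    ∑ m ∈ Finset.range (k + 1), termB k 1 m = 1 + 2 * (k : ℤ) := by
  have h := pascal_step k 0
  rw [termB_zero_right k, termA_zero_mid k] at h
  exact h

lemma key_identity (k N : ℕ) :
    1 + 2 * (k : ℤ) + ∑ j ∈ Finset.range N, ∑ i ∈ Finset.range k, termA k (j + 1) i
      = ∑ m ∈ Finset.range (k + 1), termB k (N + 1) m := by
  induction N with
  | zero => simpa using (base_sum k).symm
  | succ N ih =>
      rw [Finset.sum_range_succ, ← add_assoc, ih, pascal_step k (N + 1)]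

-- ===== VERDICT (by name: the statement is the Claim_ definition above) =====
theorem helper_ext_int_double_sigma_from_book_spec : Claim_equal_helper_ext_int_double_sigma_from_book := by
  intro k n _ hk
  unfold Spec_helper_ext_int_double_sigma_from_book
  unfold Pre_helper_ext_int_double_sigma_from_book at hk
  by_cases h1 : n = 1
  · subst h1
    simp [helper_ext_int_double_sigma_from_book, helper_ext_int_double_sigma_from_book_alt,
      binomial_coefficient, pyComb, Nat.choose_one_right]
    omega
  · by_cases h2 : n ≤ 1
    · simp only [helper_ext_int_double_sigma_from_book, helper_ext_int_double_sigma_from_book_alt,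
        binomial_coefficient, pyComb, if_neg h1, if_pos h2]
      rw [PySem.List.pyRange_one_eq_nil (a := 1) (b := (n - 1) + 1) (by omega)]
      simp [Nat.choose_one_right]
      omega
    · obtain ⟨K, rfl⟩ : ∃ K : ℕ, k = (K : ℤ) := ⟨k.toNat, (Int.toNat_of_nonneg hk).symm⟩
      obtain ⟨N, rfl⟩ : ∃ N : ℕ, n = (N : ℤ) + 1 := ⟨(n - 1).toNat, by omega⟩
      simp only [helper_ext_int_double_sigma_from_book, helper_ext_int_double_sigma_from_book_alt,
        binomial_coefficient, pyComb, if_neg h1, if_neg h2]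
      have hn : (((N : ℤ) + 1) - 1 + 1) = (N : ℤ) + 1 := by ring
      have hkk : (((K : ℤ)) - 1 + 1) = (K : ℤ) := by ring
      rw [hn, hkk]
      simp only [PySem.List.foldl_add]
      rw [PySem.List.pyRange_one 1 ((N:ℤ)+1), PySem.List.pyRange_one 0 (K:ℤ),
          PySem.List.pyRange_one 0 ((K:ℤ)+1)]
      simp only [List.map_map]
      have e1 : (((N:ℤ) + 1) - 1).toNat = N := by omega
      have e2 : ((K:ℤ) - 0).toNat = K := by omega
      have e3 : ((K:ℤ) + 1 - 0).toNat = K + 1 := by omega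
      rw [e1, e2, e3, sum_map_cast, sum_map_cast]
      simp only [Int.toNat_natCast]
      have hL : ∀ j ∈ Finset.range N,
          (List.map ((fun x_1 => 2 ^ (1 + x_1).toNat * ((K:ℕ).choose (1 + x_1).toNat : ℤ) *
              (((1 + (j:ℤ)).toNat).choose x_1.toNat : ℤ)) ∘ fun t : ℕ => (0:ℤ) + (t:ℤ))
            (List.range K)).sum = ∑ i ∈ Finset.range K, termA K (j + 1) i := by
        intro j _
        rw [sum_map_cast]
        refine Finset.sum_congr rfl (fun i _ => ?_)
        have a1 : (1 + ((0:ℤ) + (i:ℤ))).toNat = 1 + i := by omega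
        have a2 : ((0:ℤ) + (i:ℤ)).toNat = i := by omega
        have a3 : (1 + (j:ℤ)).toNat = j + 1 := by omega
        rw [a1, a2, a3, termA]
      rw [Finset.sum_congr rfl hL]
      have hR : ∀ m ∈ Finset.range (K + 1),
          2 ^ ((0:ℤ) + (m:ℤ)).toNat * ((K:ℕ).choose ((0:ℤ) + (m:ℤ)).toNat : ℤ) *
            ((((N:ℤ) + 1).toNat).choose ((0:ℤ) + (m:ℤ)).toNat : ℤ) = termB K (N + 1) m := by
        intro m _
        have a2 : ((0:ℤ) + (m:ℤ)).toNat = m := by omega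
        have a4 : ((N:ℤ) + 1).toNat = N + 1 := by omega
        rw [a2, a4, termB]
      rw [Finset.sum_congr rfl hR]
      have key := key_identity K N
      simp only [Int.toNat_one, Int.toNat_zero, Nat.choose_one_right, Nat.choose_zero_right]
      push_cast
      linarith [key]
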